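-- pv_equiv track=rewrite | github.com/iamrishap/PythonBits | InterviewBits/dp/ways-to-color-3N-board.py | solve
-- ===== SOURCE A (Python) =====
-- from itertools import product
--
-- def count(x, y, z):
--     ''' number of ways to form 2 and 3-colored column '''
--     ''' x, y, z = colors of previous column '''
--     num2, num3 = 0, 0
--     for a, b, c in product(range(4), repeat=3):
--         if a != b and b != c and a != x and b != y and c != z:
--             if a == c:
--                 num2 += 1
--             else:
--                 num3 += 1
--     return num2, num3
--
-- def solve(A):
--     MODU = 1000000007
--     if A == 0:
--         return 1
--     # First column
--     n2, n3 = count(None, None, None)  # 12, 24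
--     # When previous column has 2 colors (resp. 3)
--     n2_2, n2_3 = count(0, 1, 0)  # 7, 10
--     n3_2, n3_3 = count(0, 1, 2)  # 5, 11
--     # n2, n3: number of combinations ending with 2 colored column (resp. 3)
--     for i in range(1, A):
--         n2, n3 = (n2 * n2_2 + n3 * n3_2) % MODU, \
--                  (n2 * n2_3 + n3 * n3_3) % MODU
--     return (n2 + n3) % MODU
-- ===== SOURCE B (Python) =====
-- def solve(A):
--     MOD = 1000000007
--     if A == 0:
--         return 1
--     def mul(X, Y):
--         return ((X[0]*Y[0] + X[1]*Y[2]) % MOD, (X[0]*Y[1] + X[1]*Y[3]) % MOD,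
--                 (X[2]*Y[0] + X[3]*Y[2]) % MOD, (X[2]*Y[1] + X[3]*Y[3]) % MOD)
--     # transition matrix acting on the row vector (n2, n3), row-major
--     M = (7, 10, 5, 11)
--     R = (1, 0, 0, 1)
--     e = A - 1
--     while e > 0:
--         if e % 2:
--             R = mul(R, M)
--         M = mul(M, M)
--         e //= 2
--     n2 = (12*R[0] + 24*R[2]) % MOD
--     n3 = (12*R[1] + 24*R[3]) % MOD
--     return (n2 + n3) % MOD
-- ===== Notes on version B (the rewrite author's own statement) =====
-- stated objective: faster
-- what changed: Replaces the O(A) linear recurrence loop (and the brute-force count() enumeration of the coefficients) with binary exponentiation of the 2x2 transition matrix [[7,10],[5,11]] mod 1e9+7.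
import Mathlib
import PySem

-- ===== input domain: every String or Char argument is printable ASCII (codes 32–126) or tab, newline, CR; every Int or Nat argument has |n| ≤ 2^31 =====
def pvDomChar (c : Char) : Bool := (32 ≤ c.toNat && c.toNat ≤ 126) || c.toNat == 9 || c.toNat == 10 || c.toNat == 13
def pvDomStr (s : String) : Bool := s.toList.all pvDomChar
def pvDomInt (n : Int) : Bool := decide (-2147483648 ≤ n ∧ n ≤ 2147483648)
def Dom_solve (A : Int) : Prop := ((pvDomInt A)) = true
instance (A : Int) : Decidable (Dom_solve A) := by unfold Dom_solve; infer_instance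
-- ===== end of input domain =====

-- B replaces A's O(A) linear-recurrence loop by binary exponentiation of the 2x2
-- transition matrix mod 1e9+7 (objective: faster, asymptotic).

-- ===== PORT A =====
-- count(x, y, z): brute-force enumeration of all 4^3 column colorings; None is
-- modelled as `none` and Python's `a != x` (int vs possibly-None) as `some a ≠ x`.
def countA (x y z : Option Int) : Int × Int :=
  (PySem.List.pyRange 0 4 1).foldl (fun acc a =>
    (PySem.List.pyRange 0 4 1).foldl (fun acc b =>
      (PySem.List.pyRange 0 4 1).foldl (fun acc c =>
        if a ≠ b ∧ b ≠ c ∧ some a ≠ x ∧ some b ≠ y ∧ some c ≠ z then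
          if a = c then (acc.1 + 1, acc.2) else (acc.1, acc.2 + 1)
        else acc) acc) acc) ((0 : Int), (0 : Int))

def solve (A : Int) : Int :=
  let MODU : Int := 1000000007
  if A = 0 then 1
  else
    let p := countA none none none
    let q := countA (some 0) (some 1) (some 0)
    let r := countA (some 0) (some 1) (some 2)
    let res := (PySem.List.pyRange 1 A 1).foldl
      (fun (s : Int × Int) _ =>
        (PySem.Int.mod (s.1 * q.1 + s.2 * r.1) MODU,
         PySem.Int.mod (s.1 * q.2 + s.2 * r.2) MODU)) p
    PySem.Int.mod (res.1 + res.2) MODU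

-- ===== PORT B =====
-- 2x2 matrices as row-major quadruples (m00, m01, m10, m11)
def mulB (X Y : Int × Int × Int × Int) : Int × Int × Int × Int :=
  (PySem.Int.mod (X.1 * Y.1 + X.2.1 * Y.2.2.1) 1000000007,
   PySem.Int.mod (X.1 * Y.2.1 + X.2.1 * Y.2.2.2) 1000000007,
   PySem.Int.mod (X.2.2.1 * Y.1 + X.2.2.2 * Y.2.2.1) 1000000007,
   PySem.Int.mod (X.2.2.1 * Y.2.1 + X.2.2.2 * Y.2.2.2) 1000000007)

-- the while-loop of Source B: binary exponentiation accumulating into R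
def powLoopB (R M : Int × Int × Int × Int) (e : Int) : Int × Int × Int × Int :=
  if 0 < e then
    powLoopB (if PySem.Int.mod e 2 ≠ 0 then mulB R M else R) (mulB M M)
      (PySem.Int.floordiv e 2)
  else R
termination_by e.toNat
decreasing_by
  rw [PySem.Int.floordiv_eq_ediv_of_pos (by norm_num)]
  omega

def solve_alt (A : Int) : Int :=
  let MOD : Int := 1000000007
  if A = 0 then 1
  else
    let R := powLoopB (1, 0, 0, 1) (7, 10, 5, 11) (A - 1)
    let n2 := PySem.Int.mod (12 * R.1 + 24 * R.2.2.1) MOD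
    let n3 := PySem.Int.mod (12 * R.2.1 + 24 * R.2.2.2) MOD
    PySem.Int.mod (n2 + n3) MOD

-- ===== PRECONDITION & SPEC =====
def Spec_solve (A : Int) (out : Int) : Prop := out = solve_alt A
instance (A : Int) (out : Int) : Decidable (Spec_solve A out) := by unfold Spec_solve; infer_instance

-- ===== CLAIM (what is proved, stated in full; the proofs are below) =====
def Claim_equal_solve : Prop := ∀ (A : Int), Dom_solve A → Spec_solve A (solve A)

-- ===== LEMMAS AND PROOFS =====

-- work in ZMod 1000000007; matrices are row-major quadruples, vectors are pairs
def MZ : Type := ZMod 1000000007 × ZMod 1000000007 × ZMod 1000000007 × ZMod 1000000007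

def mz (X Y : MZ) : MZ :=
  (X.1 * Y.1 + X.2.1 * Y.2.2.1, X.1 * Y.2.1 + X.2.1 * Y.2.2.2,
   X.2.2.1 * Y.1 + X.2.2.2 * Y.2.2.1, X.2.2.1 * Y.2.1 + X.2.2.2 * Y.2.2.2)

def idZ : MZ := (1, 0, 0, 1)

def pz (X : MZ) : Nat → MZ
  | 0 => idZ
  | n + 1 => mz (pz X n) X

def castM (X : Int × Int × Int × Int) : MZ :=
  ((X.1 : ZMod 1000000007), (X.2.1 : ZMod 1000000007),
   (X.2.2.1 : ZMod 1000000007), (X.2.2.2 : ZMod 1000000007))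

def vz (w : ZMod 1000000007 × ZMod 1000000007) (X : MZ) :
    ZMod 1000000007 × ZMod 1000000007 :=
  (w.1 * X.1 + w.2 * X.2.2.1, w.1 * X.2.1 + w.2 * X.2.2.2)

def M0 : MZ := (7, 10, 5, 11)

-- the body of A's loop
def stepI (s : Int × Int) : Int × Int :=
  (PySem.Int.mod (s.1 * 7 + s.2 * 5) 1000000007,
   PySem.Int.mod (s.1 * 10 + s.2 * 11) 1000000007)

theorem castmod (a : Int) :
    ((PySem.Int.mod a 1000000007 : Int) : ZMod 1000000007) = (a : ZMod 1000000007) := by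
  rw [PySem.Int.mod_eq_emod_of_pos (by norm_num)]
  simpa using ZMod.intCast_mod a 1000000007

theorem countA_nnn : countA none none none = (12, 24) := by decide
theorem countA_010 : countA (some 0) (some 1) (some 0) = (7, 10) := by decide
theorem countA_012 : countA (some 0) (some 1) (some 2) = (5, 11) := by decide

theorem mz_assoc (X Y Z : MZ) : mz (mz X Y) Z = mz X (mz Y Z) := by
  simp only [mz]; refine Prod.ext ?_ (Prod.ext ?_ (Prod.ext ?_ ?_)) <;> ring

theorem mz_id_left (X : MZ) : mz idZ X = X := by
  simp only [mz, idZ]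
  refine Prod.ext ?_ (Prod.ext ?_ (Prod.ext ?_ ?_)) <;> ring

theorem mz_id_right (X : MZ) : mz X idZ = X := by
  simp only [mz, idZ]
  refine Prod.ext ?_ (Prod.ext ?_ (Prod.ext ?_ ?_)) <;> ring

theorem pz_comm (X : MZ) (n : Nat) : mz X (pz X n) = mz (pz X n) X := by
  induction n with
  | zero => rw [pz, mz_id_left, mz_id_right]
  | succ n ih => rw [pz, ← mz_assoc, ih]

theorem pz_sq (X : MZ) (k : Nat) : pz (mz X X) k = pz X (2 * k) := by
  induction k with
  | zero => rfl
  | succ k ih =>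
      have : 2 * (k + 1) = 2 * k + 1 + 1 := by ring
      rw [pz, ih, this, pz, pz, mz_assoc]

theorem powLoopB_cast (e : Int) (R M : Int × Int × Int × Int) :
    castM (powLoopB R M e) = mz (castM R) (pz (castM M) e.toNat) := by
  by_cases h : 0 < e
  · have hd : PySem.Int.floordiv e 2 = e / 2 :=
      PySem.Int.floordiv_eq_ediv_of_pos (by norm_num)
    have hm : PySem.Int.mod e 2 = e % 2 :=
      PySem.Int.mod_eq_emod_of_pos (by norm_num)
    have hrec : castM (powLoopB (if PySem.Int.mod e 2 ≠ 0 then mulB R M else R)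
        (mulB M M) (PySem.Int.floordiv e 2)) =
        mz (castM (if PySem.Int.mod e 2 ≠ 0 then mulB R M else R))
          (pz (castM (mulB M M)) (PySem.Int.floordiv e 2).toNat) :=
      powLoopB_cast (PySem.Int.floordiv e 2) _ _
    rw [powLoopB, if_pos h, hrec]
    have hcmul : ∀ X Y, castM (mulB X Y) = mz (castM X) (castM Y) := by
      intro X Y
      simp only [mulB, mz, castM, castmod]
      push_cast
      rfl
    rw [hcmul M M, pz_sq]
    by_cases hpar : PySem.Int.mod e 2 ≠ 0
    · obtain ⟨k, hk2⟩ : ∃ k, e.toNat = 2 * k + 1 := by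
        refine ⟨e.toNat / 2, ?_⟩; rw [hm] at hpar; omega
      have hk : (PySem.Int.floordiv e 2).toNat = k := by rw [hd]; omega
      rw [if_pos hpar, hcmul, hk, hk2, pz, mz_assoc, ← pz_comm]
    · obtain ⟨k, hk2⟩ : ∃ k, e.toNat = 2 * k := by
        refine ⟨e.toNat / 2, ?_⟩; rw [hm] at hpar; omega
      have hk : (PySem.Int.floordiv e 2).toNat = k := by rw [hd]; omega
      rw [if_neg hpar, hk, hk2]
  · rw [powLoopB, if_neg h]
    have : e.toNat = 0 := by omega
    rw [this, pz, mz_id_right]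
termination_by e.toNat
decreasing_by
  rw [PySem.Int.floordiv_eq_ediv_of_pos (by norm_num)]
  omega

theorem foldl_const {α β : Type} (f : β → β) (l : List α) (v : β) :
    l.foldl (fun s _ => f s) v = f^[l.length] v := by
  induction l generalizing v with
  | nil => rfl
  | cons a l ih => simp [List.foldl, ih, Function.iterate_succ_apply]

def castP (s : Int × Int) : ZMod 1000000007 × ZMod 1000000007 :=
  ((s.1 : ZMod 1000000007), (s.2 : ZMod 1000000007))

theorem step_cast (s : Int × Int) : castP (stepI s) = vz (castP s) M0 := by
  simp only [stepI, castP, vz, M0, castmod]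
  push_cast
  rfl

theorem vz_mz (w : ZMod 1000000007 × ZMod 1000000007) (X Y : MZ) :
    vz (vz w X) Y = vz w (mz X Y) := by
  simp only [vz, mz]; refine Prod.ext ?_ ?_ <;> ring

theorem iter_cast (n : Nat) (s : Int × Int) :
    castP (stepI^[n] s) = vz (castP s) (pz M0 n) := by
  induction n with
  | zero =>
      simp only [Function.iterate_zero, id, pz, idZ, vz]
      refine Prod.ext ?_ ?_ <;> simp
  | succ n ih =>
      rw [Function.iterate_succ_apply', step_cast, ih, vz_mz, pz]

theorem intCast_inj_of_mod (x y : Int) (hx0 : 0 ≤ x) (hx : x < 1000000007)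
    (hy0 : 0 ≤ y) (hy : y < 1000000007)
    (h : (x : ZMod 1000000007) = (y : ZMod 1000000007)) : x = y := by
  have := (ZMod.intCast_eq_intCast_iff' x y 1000000007).mp h
  rw [Int.emod_eq_of_lt hx0 (by exact_mod_cast hx),
      Int.emod_eq_of_lt hy0 (by exact_mod_cast hy)] at this
  exact this

-- ===== VERDICT (by name: the statement is the Claim_ definition above) =====
theorem solve_spec : Claim_equal_solve := by
  intro A _
  unfold Spec_solve
  by_cases hA : A = 0
  · simp [solve, solve_alt, hA]
  · -- both sides are final `% 1e9+7` values; compare their casts in ZMod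
    have hsolve : solve A =
        PySem.Int.mod ((stepI^[(A - 1).toNat] (12, 24)).1 +
          (stepI^[(A - 1).toNat] (12, 24)).2) 1000000007 := by
      simp only [solve, if_neg hA, countA_nnn, countA_010, countA_012]
      have : (PySem.List.pyRange 1 A 1).foldl
          (fun (s : Int × Int) _ =>
            (PySem.Int.mod (s.1 * 7 + s.2 * 5) 1000000007,
             PySem.Int.mod (s.1 * 10 + s.2 * 11) 1000000007)) (12, 24) =
          stepI^[(A - 1).toNat] (12, 24) := by
        show (PySem.List.pyRange 1 A 1).foldl (fun (s : Int × Int) _ => stepI s) (12, 24) =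
          stepI^[(A - 1).toNat] (12, 24)
        rw [foldl_const stepI (PySem.List.pyRange 1 A 1) (12, 24),
            PySem.List.length_pyRange_one]
      rw [this]
    set n := (A - 1).toNat with hn
    have halt : solve_alt A =
        PySem.Int.mod
          (PySem.Int.mod (12 * (powLoopB (1,0,0,1) (7,10,5,11) (A-1)).1 +
             24 * (powLoopB (1,0,0,1) (7,10,5,11) (A-1)).2.2.1) 1000000007 +
           PySem.Int.mod (12 * (powLoopB (1,0,0,1) (7,10,5,11) (A-1)).2.1 +
             24 * (powLoopB (1,0,0,1) (7,10,5,11) (A-1)).2.2.2) 1000000007)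
          1000000007 := by
      simp only [solve_alt, if_neg hA]
    have hbound : ∀ a : Int, 0 ≤ PySem.Int.mod a 1000000007 ∧
        PySem.Int.mod a 1000000007 < 1000000007 := fun a =>
      ⟨PySem.Int.mod_nonneg a (by norm_num), PySem.Int.mod_lt a (by norm_num)⟩
    rw [hsolve, halt]
    apply intCast_inj_of_mod _ _ (hbound _).1 (hbound _).2
      (hbound _).1 (hbound _).2
    ·
      have hR : castM (powLoopB (1,0,0,1) (7,10,5,11) (A-1)) = pz M0 n := by
        rw [powLoopB_cast]
        have h1 : castM ((1:Int),(0:Int),(0:Int),(1:Int)) = idZ := by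
          simp [castM, idZ]
        have h2 : castM ((7:Int),(10:Int),(5:Int),(11:Int)) = M0 := by
          simp [castM, M0]
        rw [h1, h2, mz_id_left, hn]
      have hI : castP (stepI^[n] (12, 24)) = vz (12, 24) (pz M0 n) := by
        rw [iter_cast]; norm_num [castP]
      push_cast [castmod]
      have e1 : ((stepI^[n] ((12:Int), (24:Int))).1 : ZMod 1000000007) =
          (castP (stepI^[n] (12, 24))).1 := rfl
      have e2 : ((stepI^[n] ((12:Int), (24:Int))).2 : ZMod 1000000007) =
          (castP (stepI^[n] (12, 24))).2 := rfl
      have r1 : ((powLoopB (1,0,0,1) (7,10,5,11) (A-1)).1 : ZMod 1000000007) =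
          (pz M0 n).1 := by rw [← hR]; rfl
      have r2 : ((powLoopB (1,0,0,1) (7,10,5,11) (A-1)).2.1 : ZMod 1000000007) =
          (pz M0 n).2.1 := by rw [← hR]; rfl
      have r3 : ((powLoopB (1,0,0,1) (7,10,5,11) (A-1)).2.2.1 : ZMod 1000000007) =
          (pz M0 n).2.2.1 := by rw [← hR]; rfl
      have r4 : ((powLoopB (1,0,0,1) (7,10,5,11) (A-1)).2.2.2 : ZMod 1000000007) =
          (pz M0 n).2.2.2 := by rw [← hR]; rfl
      rw [e1, e2, hI, r1, r2, r3, r4]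
      simp only [vz]
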